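-- pv_equiv track=rewrite | github.com/RogoLabs/EPSS-Splunk-TA | TA-epss/bin/epss_lib/csv_processor.py | _parse_comment_line
-- ===== SOURCE A (Python) =====
-- from typing import Optional
--
-- def _parse_comment_line(line: str) -> tuple[Optional[str], Optional[str]]:
--     """
--     Extract model_version and score_date from CSV comment line.
--
--     Args:
--         line: Comment line starting with '#'
--
--     Returns:
--         Tuple of (model_version, score_date) where score_date is YYYY-MM-DD format
--     """
--     model_version = None
--     score_date = None
--     if not line.startswith("#"):
--         return model_version, score_date
--     content = line[1:]
--     for part in content.split(","):
--         part = part.strip()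
--         if part.startswith("model_version:"):
--             model_version = part.split(":", 1)[1]
--         elif part.startswith("score_date:"):
--             date_str = part.split(":", 1)[1]
--             # Extract just YYYY-MM-DD from ISO timestamp
--             # Handles both Z and +0000 suffixes
--             score_date = date_str[:10]
--     return model_version, score_date
-- ===== SOURCE B (Python) =====
-- from typing import Optional
--
-- def _parse_comment_line(line: str) -> tuple[Optional[str], Optional[str]]:
--     """Collect every 'key:value' field of the comment into a dict, then look up
--     model_version and score_date (trimmed to YYYY-MM-DD) by key."""
--     if not line.startswith("#"):
--         return None, None
--     fields = {}
--     for part in line[1:].split(","):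
--         part = part.strip()
--         if ":" in part:
--             key, value = part.split(":", 1)
--             fields[key] = value
--     model_version = fields.get("model_version")
--     score_date = fields.get("score_date")
--     return model_version, score_date[:10] if score_date is not None else None
-- ===== Notes on version B (the rewrite author's own statement) =====
-- stated objective: idiomatic
-- what changed: B replaces A's per-key if/elif matching inside the loop by building a dict of all key:value fields (split once on ':', last occurrence wins) and reading the two results by lookup afterwards.
import Mathlib
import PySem

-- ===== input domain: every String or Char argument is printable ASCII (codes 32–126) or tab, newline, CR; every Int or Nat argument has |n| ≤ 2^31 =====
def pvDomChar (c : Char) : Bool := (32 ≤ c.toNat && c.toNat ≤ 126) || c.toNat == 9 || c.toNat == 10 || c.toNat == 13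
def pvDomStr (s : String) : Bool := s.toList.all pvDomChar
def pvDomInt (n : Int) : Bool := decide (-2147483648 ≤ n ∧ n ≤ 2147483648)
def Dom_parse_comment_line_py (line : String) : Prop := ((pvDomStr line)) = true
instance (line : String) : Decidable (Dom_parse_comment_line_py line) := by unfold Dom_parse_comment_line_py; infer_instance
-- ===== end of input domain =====

-- B replaces A's per-key if/elif matching inside the loop by building a dict of all key:value
-- fields (last occurrence wins, like A's overwriting loop) and reading the two results by lookup.

-- ===== PORT A =====
-- literal port of A (loop body as the named helper pvStepA). content.split(",") has a nonempty
-- separator, so split? is always `some` and `.getD []` is exact; part.split(":", 1)[1] is only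
-- evaluated when the part starts with "model_version:"/"score_date:", so index 1 always exists
-- and pyGet?'s IndexError case (the `.getD ""` default) is unreachable.
def pvStepA (st : Option String × Option String) (part0 : String) :
    Option String × Option String :=
  let part := PySem.Str.strip part0
  if PySem.Str.startswith part "model_version:" then
    (some ((PySem.List.pyGet? ((PySem.Str.splitMax? part ":" 1).getD []) 1).getD ""), st.2)
  else if PySem.Str.startswith part "score_date:" then
    let date_str := (PySem.List.pyGet? ((PySem.Str.splitMax? part ":" 1).getD []) 1).getD ""
    (st.1, some (PySem.Str.slice date_str none (some 10)))
  else st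

def parse_comment_line_py (line : String) : Option String × Option String :=
  if !(PySem.Str.startswith line "#") then (none, none)
  else
    let content := PySem.Str.slice line (some 1) none
    ((PySem.Str.split? content ",").getD []).foldl pvStepA (none, none)

-- ===== PORT B =====
-- literal port of Source B (loop body as the named helper pvStepB); `key, value = part.split(":", 1)`
-- always gets exactly two pieces because the part contains ':', so the `| _ => d` arm is unreachable.
def pvStepB (d : PySem.Dict String String) (part0 : String) : PySem.Dict String String :=
  let part := PySem.Str.strip part0
  if PySem.Str.isIn ":" part then
    match (PySem.Str.splitMax? part ":" 1).getD [] with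
    | [key, value] => d.insert key value
    | _ => d
  else d

def parse_comment_line_py_alt (line : String) : Option String × Option String :=
  if !(PySem.Str.startswith line "#") then (none, none)
  else
    let fields := ((PySem.Str.split? (PySem.Str.slice line (some 1) none) ",").getD []).foldl
      pvStepB PySem.Dict.empty
    (PySem.Dict.get? fields "model_version",
     match PySem.Dict.get? fields "score_date" with
     | some score_date => some (PySem.Str.slice score_date none (some 10))
     | none => none)

-- ===== PRECONDITION & SPEC =====
def Spec_parse_comment_line_py (line : String) (out : Option String × Option String) : Prop := out = parse_comment_line_py_alt line
instance (line : String) (out : Option String × Option String) : Decidable (Spec_parse_comment_line_py line out) := by unfold Spec_parse_comment_line_py; infer_instance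

-- ===== CLAIM (what is proved, stated in full; the proofs are below) =====
def Claim_equal_parse_comment_line_py : Prop := ∀ (line : String), Dom_parse_comment_line_py line → Spec_parse_comment_line_py line (parse_comment_line_py line)

-- ===== LEMMAS AND PROOFS =====

-- splitOnMax.go with maxsplit exhausted returns the rest as one piece.
theorem pv_go_m0 (fuel : Nat) (l cur : List Char) (acc : List (List Char)) :
    PySem.Chars.splitOnMax.go [':'] fuel 0 l cur acc = acc.reverse ++ [cur.reverse ++ l] := by
  cases fuel with
  | zero => rw [PySem.Chars.splitOnMax.go]; simp
  | succ n =>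
    cases l with
    | nil => rw [PySem.Chars.splitOnMax.go]; simp; omega
    | cons c rest => rw [PySem.Chars.splitOnMax.go]; simp

-- splitOnMax.go with maxsplit 1 splits at the first colon.
theorem pv_go_yes : ∀ (a : List Char) (fuel : Nat) (b cur : List Char) (acc : List (List Char)),
    a.length + b.length < fuel → ':' ∉ a →
    PySem.Chars.splitOnMax.go [':'] fuel 1 (a ++ ':' :: b) cur acc
      = acc.reverse ++ [cur.reverse ++ a, b] := by
  intro a
  induction a with
  | nil =>
    intro fuel b cur acc h _
    cases fuel with
    | zero => exact absurd h (by omega)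
    | succ n =>
      simp only [List.nil_append]
      rw [PySem.Chars.splitOnMax.go]
      simp only [List.isPrefixOf, beq_self_eq_true, Bool.true_and]
      simp only [show ¬(1 = 0) by omega, if_false]
      rw [show (1:Nat) - 1 = 0 from rfl]
      rw [pv_go_m0]
      simp
  | cons c a ih =>
    intro fuel b cur acc h hm
    cases fuel with
    | zero => exact absurd h (by omega)
    | succ n =>
      have hc : (':' == c) = false := by
        simp; intro h'; exact hm (h' ▸ List.mem_cons_self ..)
      simp only [List.cons_append]
      rw [PySem.Chars.splitOnMax.go]
      simp only [List.isPrefixOf, hc, Bool.false_and]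
      simp only [show ¬(1 = 0) by omega, if_false]
      rw [ih n b (c :: cur) acc (by simp at h ⊢; omega) (fun hx => hm (List.mem_cons_of_mem _ hx))]
      simp

-- s.split(":", 1) on a string with first colon after `a` is [a, rest]
theorem pv_splitMax_yes (s : String) (a b : List Char)
    (hs : s.toList = a ++ ':' :: b) (ha : ':' ∉ a) :
    PySem.Str.splitMax? s ":" 1 = some [String.ofList a, String.ofList b] := by
  unfold PySem.Str.splitMax? PySem.Chars.splitMax? PySem.Chars.splitOnMax
  rw [if_neg (by simp), if_neg (by omega)]
  rw [show ((1:Int)).toNat = 1 from rfl]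
  rw [show (":" : String).toList = [':'] from rfl]
  rw [hs, pv_go_yes a ((a ++ ':' :: b).length + 1) b [] []
        (by simp only [List.length_append, List.length_cons]; omega) ha]
  simp

theorem pv_exists_colon_split : ∀ (l : List Char), ':' ∈ l →
    ∃ a b, l = a ++ ':' :: b ∧ ':' ∉ a := by
  intro l h
  induction l with
  | nil => cases h
  | cons c rest ih =>
    by_cases hc : c = ':'
    · exact ⟨[], rest, by simp [hc], by simp⟩
    · rcases List.mem_cons.mp h with h' | h'
      · exact absurd h'.symm hc
      · obtain ⟨a, b, hab, hna⟩ := ih h'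
        exact ⟨c :: a, b, by simp [hab], by
          intro hx
          rcases List.mem_cons.mp hx with hx | hx
          · exact hc hx.symm
          · exact hna hx⟩

-- `":" in q` is exactly "q's character list contains ':'"
theorem pv_isIn_colon (q : String) : PySem.Str.isIn ":" q = (':' ∈ q.toList : Bool) := by
  by_cases h : ':' ∈ q.toList
  · simp only [h, decide_true]
    rw [PySem.Str.isIn_iff_infix]
    obtain ⟨a, b, hab⟩ := List.append_of_mem h
    exact ⟨a, b, by simp [hab]⟩
  · simp only [h, decide_false]
    rw [← Bool.not_eq_true, PySem.Str.isIn_iff_infix]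
    intro hinf
    exact h (hinf.subset (by simp))

-- the main loop invariant: A's running pair is the two dict lookups of B's running dict
theorem pv_loop_inv (parts : List String) : ∀ (d : PySem.Dict String String),
    parts.foldl pvStepA
      (PySem.Dict.get? d "model_version",
       (PySem.Dict.get? d "score_date").map (fun s => PySem.Str.slice s none (some 10)))
    = (PySem.Dict.get? (parts.foldl pvStepB d) "model_version",
       (PySem.Dict.get? (parts.foldl pvStepB d) "score_date").map
         (fun s => PySem.Str.slice s none (some 10))) := by
  induction parts with
  | nil => intro d; rfl
  | cons p rest ih =>
    intro d
    simp only [List.foldl_cons, pvStepA, pvStepB]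
    by_cases hmv : PySem.Str.startswith (PySem.Str.strip p) "model_version:" = true
    · -- the part carries model_version
      obtain ⟨r, hr⟩ : ∃ r, (PySem.Str.strip p).toList = "model_version".toList ++ ':' :: r := by
        have h1 := (PySem.Chars.startswith_iff (PySem.Str.strip p).toList
          ("model_version:").toList).mp (by rw [← PySem.Str.startswith_eq]; exact hmv)
        obtain ⟨t, ht⟩ := h1
        exact ⟨t, by rw [← ht]; rfl⟩
      have hsplit := pv_splitMax_yes (PySem.Str.strip p) "model_version".toList r hr (by decide)
      rw [show String.ofList ("model_version".toList) = "model_version" from rfl] at hsplit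
      have hin : PySem.Str.isIn ":" (PySem.Str.strip p) = true := by
        have hmem : ':' ∈ (PySem.Str.strip p).toList := by
          rw [hr]; exact List.mem_append_right _ (List.mem_cons_self ..)
        rw [pv_isIn_colon]; exact decide_eq_true hmem
      have hval : ((PySem.List.pyGet? ["model_version", String.ofList r] 1).getD "")
          = String.ofList r := rfl
      simp only [hmv, hin, hsplit, Option.getD_some, hval, if_true]
      have h2 := ih (PySem.Dict.insert d "model_version" (String.ofList r))
      rw [PySem.Dict.get?_insert_self,
        PySem.Dict.get?_insert_of_ne _ _ (show ("score_date":String) ≠ "model_version" by decide)] at h2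
      exact h2
    · by_cases hsd : PySem.Str.startswith (PySem.Str.strip p) "score_date:" = true
      · -- the part carries score_date
        obtain ⟨r, hr⟩ : ∃ r, (PySem.Str.strip p).toList = "score_date".toList ++ ':' :: r := by
          have h1 := (PySem.Chars.startswith_iff (PySem.Str.strip p).toList
            ("score_date:").toList).mp (by rw [← PySem.Str.startswith_eq]; exact hsd)
          obtain ⟨t, ht⟩ := h1
          exact ⟨t, by rw [← ht]; rfl⟩
        have hsplit := pv_splitMax_yes (PySem.Str.strip p) "score_date".toList r hr (by decide)
        rw [show String.ofList ("score_date".toList) = "score_date" from rfl] at hsplit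
        have hin : PySem.Str.isIn ":" (PySem.Str.strip p) = true := by
          have hmem : ':' ∈ (PySem.Str.strip p).toList := by
            rw [hr]; exact List.mem_append_right _ (List.mem_cons_self ..)
          rw [pv_isIn_colon]; exact decide_eq_true hmem
        have hval : ((PySem.List.pyGet? ["score_date", String.ofList r] 1).getD "")
            = String.ofList r := rfl
        rw [Bool.not_eq_true] at hmv
        simp only [hmv, hsd, hin, hsplit, Option.getD_some, hval, if_true,
          Bool.false_eq_true, if_false]
        have h2 := ih (PySem.Dict.insert d "score_date" (String.ofList r))
        rw [PySem.Dict.get?_insert_self,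
          PySem.Dict.get?_insert_of_ne _ _ (show ("model_version":String) ≠ "score_date" by decide)] at h2
        simp only [Option.map_some] at h2
        exact h2
      · rw [Bool.not_eq_true] at hmv hsd
        by_cases hc : ':' ∈ (PySem.Str.strip p).toList
        · -- some other key:value field
          obtain ⟨a, b, hab, hna⟩ := pv_exists_colon_split _ hc
          have hsplit := pv_splitMax_yes (PySem.Str.strip p) a b hab hna
          have hin : PySem.Str.isIn ":" (PySem.Str.strip p) = true := by
            rw [pv_isIn_colon]; exact decide_eq_true hc
          have hk1 : String.ofList a ≠ "model_version" := by
            intro h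
            have ha' : a = "model_version".toList := by
              rw [← String.toList_ofList (l := a), h]
            have hpre : PySem.Str.startswith (PySem.Str.strip p) "model_version:" = true := by
              rw [PySem.Str.startswith_eq]
              refine (PySem.Chars.startswith_iff _ _).mpr ⟨b, ?_⟩
              rw [hab, ha']
              rfl
            rw [hmv] at hpre
            exact Bool.false_ne_true hpre
          have hk2 : String.ofList a ≠ "score_date" := by
            intro h
            have ha' : a = "score_date".toList := by
              rw [← String.toList_ofList (l := a), h]
            have hpre : PySem.Str.startswith (PySem.Str.strip p) "score_date:" = true := by
              rw [PySem.Str.startswith_eq]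
              refine (PySem.Chars.startswith_iff _ _).mpr ⟨b, ?_⟩
              rw [hab, ha']
              rfl
            rw [hsd] at hpre
            exact Bool.false_ne_true hpre
          simp only [hmv, hsd, hin, hsplit, Option.getD_some, if_true,
            Bool.false_eq_true, if_false]
          have h2 := ih (PySem.Dict.insert d (String.ofList a) (String.ofList b))
          rw [PySem.Dict.get?_insert_of_ne _ _ (Ne.symm hk1),
            PySem.Dict.get?_insert_of_ne _ _ (Ne.symm hk2)] at h2
          exact h2
        · -- no colon: both loops leave their state unchanged
          have hin : PySem.Str.isIn ":" (PySem.Str.strip p) = false := by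
            rw [pv_isIn_colon]; exact decide_eq_false hc
          simp only [hmv, hsd, hin, Bool.false_eq_true, if_false]
          exact ih d

theorem pv_match_map (o : Option String) :
    (match o with
     | some score_date => some (PySem.Str.slice score_date none (some 10))
     | none => none)
      = o.map (fun s => PySem.Str.slice s none (some 10)) := by
  cases o <;> rfl

-- specialisation of the invariant to the actual initial states of the two ports
theorem pv_loop_main (parts : List String) :
    parts.foldl pvStepA ((none, none) : Option String × Option String)
    = (PySem.Dict.get? (parts.foldl pvStepB PySem.Dict.empty) "model_version",
       match PySem.Dict.get? (parts.foldl pvStepB PySem.Dict.empty) "score_date" with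
       | some score_date => some (PySem.Str.slice score_date none (some 10))
       | none => none) := by
  have h0 : ((none, none) : Option String × Option String)
      = (PySem.Dict.get? (PySem.Dict.empty : PySem.Dict String String) "model_version",
         (PySem.Dict.get? (PySem.Dict.empty : PySem.Dict String String) "score_date").map
           (fun s => PySem.Str.slice s none (some 10))) := by
    rw [PySem.Dict.get?_empty, PySem.Dict.get?_empty]; rfl
  rw [h0, pv_loop_inv, pv_match_map]

-- ===== VERDICT (by name: the statement is the Claim_ definition above) =====
theorem parse_comment_line_py_spec : Claim_equal_parse_comment_line_py := by
  intro line _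
  unfold Spec_parse_comment_line_py parse_comment_line_py parse_comment_line_py_alt
  by_cases hb : PySem.Str.startswith line "#" = true
  · rw [hb, Bool.not_true]
    rw [if_neg (show ¬(false = true) from Bool.false_ne_true),
        if_neg (show ¬(false = true) from Bool.false_ne_true)]
    exact pv_loop_main ((PySem.Str.split? (PySem.Str.slice line (some 1) none) ",").getD [])
  · rw [Bool.not_eq_true] at hb
    rw [hb, Bool.not_false, if_pos rfl, if_pos rfl]
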